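-- pv_equiv track=rewrite | github.com/ron-matt163/Real-time-Cardiac | helper_code.py | get_sex
-- ===== SOURCE A (Python) =====
-- def get_sex(header):
--     sex = None
--     for l in header.split('\n'):
--         if l.startswith('#Sex') or l.startswith('# Sex'):
--             try:
--                 sex = l.split(': ')[1].strip()
--             except:
--                 pass
--     return sex
-- ===== SOURCE B (Python) =====
-- def get_sex(header):
--     # Scan lines from the end and return the first successful parse,
--     # which equals the last successful parse in forward order.
--     for l in reversed(header.split('\n')):
--         if l.startswith('#Sex') or l.startswith('# Sex'):
--             parts = l.split(': ')
--             if len(parts) > 1: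
--                 return parts[1].strip()
--     return None
-- ===== Notes on version B (the rewrite author's own statement) =====
-- stated objective: simpler
-- what changed: B scans the lines in reverse and returns at the first line that both matches a sex-prefix and splits successfully, replacing A's forward overwrite loop with try/except by an early-return reverse scan with an explicit length check.
import Mathlib
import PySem

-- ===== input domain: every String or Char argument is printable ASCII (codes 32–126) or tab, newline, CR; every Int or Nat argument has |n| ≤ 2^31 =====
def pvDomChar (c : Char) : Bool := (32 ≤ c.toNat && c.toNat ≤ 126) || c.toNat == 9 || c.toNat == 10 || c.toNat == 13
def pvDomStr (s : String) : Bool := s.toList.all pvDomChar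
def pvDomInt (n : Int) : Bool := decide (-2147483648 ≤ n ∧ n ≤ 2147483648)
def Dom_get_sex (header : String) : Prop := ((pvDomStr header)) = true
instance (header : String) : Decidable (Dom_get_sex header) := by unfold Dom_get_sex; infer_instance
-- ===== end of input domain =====

-- B replaces A's forward overwrite loop (try/except, last match wins) by a reverse scan
-- returning at the first successfully-parsed matching line; same result, plainer control flow.

-- both sources call str.split with a nonempty separator; split? is some there ([] is unreachable)
def pySplit (s sep : String) : List String := (PySem.Str.split? s sep).getD []

-- ===== PORT A =====
-- forward fold over the lines, overwriting `sex` on each successful parse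
def get_sex_stepA (acc : Option String) (l : String) : Option String :=
  if PySem.Str.startswith l "#Sex" || PySem.Str.startswith l "# Sex" then
    match PySem.List.pyGet? (pySplit l ": ") 1 with
    | some p => some (PySem.Str.strip p)   -- sex = l.split(': ')[1].strip()
    | none   => acc                        -- except: pass
  else acc

def get_sex (header : String) : Option String :=
  (pySplit header "\n").foldl get_sex_stepA none

-- ===== PORT B =====
-- first successful parse scanning the given (reversed) line list
def get_sex_scanB : List String → Option String
  | [] => none
  | l :: rest =>
    if PySem.Str.startswith l "#Sex" || PySem.Str.startswith l "# Sex" then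
      let parts := pySplit l ": "
      if h : 1 < parts.length then some (PySem.Str.strip parts[1])
      else get_sex_scanB rest
    else get_sex_scanB rest

def get_sex_alt (header : String) : Option String :=
  get_sex_scanB (pySplit header "\n").reverse

-- ===== PRECONDITION & SPEC =====
def Spec_get_sex (header : String) (out : Option String) : Prop := out = get_sex_alt header
instance (header : String) (out : Option String) : Decidable (Spec_get_sex header out) := by unfold Spec_get_sex; infer_instance

-- ===== CLAIM (what is proved, stated in full; the proofs are below) =====
def Claim_equal_get_sex : Prop := ∀ (header : String), Dom_get_sex header → Spec_get_sex header (get_sex header)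

-- ===== LEMMAS AND PROOFS =====

-- the per-line result both programs agree on
def get_sex_lineStep (l : String) : Option String :=
  if PySem.Str.startswith l "#Sex" || PySem.Str.startswith l "# Sex" then
    (PySem.List.pyGet? (pySplit l ": ") 1).map PySem.Str.strip
  else none

theorem get_sex_stepA_eq (acc : Option String) (l : String) :
    get_sex_stepA acc l = (get_sex_lineStep l).or acc := by
  unfold get_sex_stepA get_sex_lineStep
  split_ifs with h
  · cases PySem.List.pyGet? (pySplit l ": ") 1 <;> simp
  · simp

theorem get_sex_pyGet?_one (xs : List String) :
    PySem.List.pyGet? xs 1 = if h : 1 < xs.length then some xs[1] else none := by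
  simp [PySem.List.pyGet?, PySem.List.pyIdx?]
  split_ifs with h <;> simp_all

theorem get_sex_scanB_cons (l : String) (rest : List String) :
    get_sex_scanB (l :: rest) = (get_sex_lineStep l).or (get_sex_scanB rest) := by
  rw [get_sex_scanB]
  unfold get_sex_lineStep
  split_ifs with h
  · rw [get_sex_pyGet?_one]
    by_cases h2 : 1 < (pySplit l ": ").length <;> simp [h2, Option.or]
  · simp [Option.or]

theorem get_sex_scanB_append_singleton (ys : List String) (l : String) :
    get_sex_scanB (ys ++ [l]) = (get_sex_scanB ys).or (get_sex_lineStep l) := by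
  induction ys with
  | nil =>
    simp [get_sex_scanB_cons, get_sex_scanB, Option.or]
    cases get_sex_lineStep l <;> rfl
  | cons y ys ih =>
    rw [List.cons_append, get_sex_scanB_cons, get_sex_scanB_cons, ih]
    cases get_sex_lineStep y <;> simp [Option.or]

theorem get_sex_foldl_eq (xs : List String) (acc : Option String) :
    xs.foldl get_sex_stepA acc = (get_sex_scanB xs.reverse).or acc := by
  induction xs generalizing acc with
  | nil => simp [get_sex_scanB, Option.or]
  | cons l rest ih =>
    rw [List.foldl_cons, ih, List.reverse_cons, get_sex_scanB_append_singleton,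
        get_sex_stepA_eq]
    cases get_sex_scanB rest.reverse <;> cases get_sex_lineStep l <;> simp [Option.or]

-- ===== VERDICT (by name: the statement is the Claim_ definition above) =====
theorem get_sex_spec : Claim_equal_get_sex := by
  intro header _
  unfold Spec_get_sex get_sex get_sex_alt
  rw [get_sex_foldl_eq]
  cases get_sex_scanB (pySplit header "\n").reverse <;> simp [Option.or]
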